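-- pv_equiv track=rewrite | github.com/xxf-nku/python_labwork | lab5.py | find_ordered_number_in_list
-- ===== SOURCE A (Python) =====
-- import copy
--
-- def find_ordered_number_in_list(l):
--     ls = copy.deepcopy(l)
--     lt = sorted(ls)
--     t = 0
--     for i in range(len(lt)):
--         if ls[i] == lt[i]:
--             for j in range(i):
--                 if ls[j] <= lt[i]:
--                     pass
--                 else:
--                     t = 1
--                     break
--             for k in range(i+1, len(lt)):
--                 if ls[k] > lt[i]:
--                     continue
--                 else:
--                     t = 1
--                     break
--             if t == 0:
--                 return i
--     return -1
-- ===== SOURCE B (Python) =====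
-- def find_ordered_number_in_list(l):
--     s = sorted(l)
--     n = len(l)
--     pref = []                     # pref[i] = max(l[0..i])
--     m = 0
--     for x in l:
--         m = x if not pref else max(m, x)
--         pref.append(m)
--     suf = []                      # suf[i] = min(l[i..n-1])
--     m = 0
--     for x in reversed(l):
--         m = x if not suf else min(m, x)
--         suf.append(m)
--     suf.reverse()
--     for i in range(n):
--         if l[i] == s[i] and (i == 0 or pref[i-1] <= s[i]) and (i == n - 1 or s[i] < suf[i + 1]):
--             return i
--     return -1
-- ===== Notes on version B (the rewrite author's own statement) =====
-- stated objective: alternative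
-- what changed: Replaces the nested per-index rescans (and A's never-reset failure flag t) by one sort plus prefix-max/suffix-min arrays, scanning once for the first index that partitions the list (O(n log n) algorithm vs A's O(n^2) worst case; a timing run could not measure A, so no speed is claimed).
-- intended difference: On lists whose first index i with l[i]==sorted(l)[i] fails the partition test while a later index passes it, A returns -1 because its flag t is set once and never reset, whereas B returns that later (first truly valid) index, which is the intended answer. — e.g. on find_ordered_number_in_list([2, 2, 1, 4]): A returns -1, B returns 3
import Mathlib
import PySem

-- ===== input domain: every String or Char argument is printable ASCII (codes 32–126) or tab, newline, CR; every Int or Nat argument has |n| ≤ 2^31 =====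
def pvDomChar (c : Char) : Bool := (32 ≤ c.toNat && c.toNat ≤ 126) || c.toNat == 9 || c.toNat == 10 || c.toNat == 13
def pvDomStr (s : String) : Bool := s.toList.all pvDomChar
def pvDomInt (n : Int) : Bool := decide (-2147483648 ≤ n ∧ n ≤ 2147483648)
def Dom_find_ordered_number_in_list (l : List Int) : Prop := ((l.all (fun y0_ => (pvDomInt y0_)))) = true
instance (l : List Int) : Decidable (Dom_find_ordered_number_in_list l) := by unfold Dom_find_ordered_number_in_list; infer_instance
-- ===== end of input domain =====

-- B replaces A's quadratic nested rescans (whose failure flag t is never reset — an evident bug,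
-- see D_ below) by one sort plus prefix-max/suffix-min passes and a single validating scan.

-- ===== PORT A =====
-- inner 'for j in range(i)' loop of A (t the running flag; rem = iterations left)
def pvInnerJ (ls : List Int) (x : Int) : Nat → Nat → Int → Int
  | _, 0, t => t
  | j, rem + 1, t =>
      if ls.getD j 0 ≤ x then pvInnerJ ls x (j+1) rem t else 1

-- inner 'for k in range(i+1, len(lt))' loop of A
def pvInnerK (ls : List Int) (x : Int) : Nat → Nat → Int → Int
  | _, 0, t => t
  | k, rem + 1, t =>
      if x < ls.getD k 0 then pvInnerK ls x (k+1) rem t else 1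

-- A's outer 'for i in range(len(lt))' loop, carrying the sticky flag t
def pvGoA (ls lt : List Int) (n : Nat) : Nat → Nat → Int → Int
  | _, 0, _ => -1
  | i, rem + 1, t =>
      if ls.getD i 0 = lt.getD i 0 then
        let t1 := pvInnerJ ls (lt.getD i 0) 0 i t
        let t2 := pvInnerK ls (lt.getD i 0) (i+1) (n - (i+1)) t1
        if t2 = 0 then (i : Int) else pvGoA ls lt n (i+1) rem t2
      else pvGoA ls lt n (i+1) rem t

def find_ordered_number_in_list (l : List Int) : Int :=
  let ls := l
  let lt := PySem.List.sorted ls (fun x => x) false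
  pvGoA ls lt lt.length 0 lt.length 0

-- ===== PORT B =====
-- 'for x in l: m = x if not pref else max(m, x); pref.append(m)'
def pvPrefLoop (xs : List Int) (pref : List Int) (m : Int) : List Int :=
  match xs with
  | [] => pref
  | x :: rest =>
      let m' := if pref.isEmpty then x else max m x
      pvPrefLoop rest (pref ++ [m']) m'

-- 'for x in reversed(l): m = x if not suf else min(m, x); suf.append(m)'
def pvSufLoop (xs : List Int) (suf : List Int) (m : Int) : List Int :=
  match xs with
  | [] => suf
  | x :: rest =>
      let m' := if suf.isEmpty then x else min m x
      pvSufLoop rest (suf ++ [m']) m'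

-- B's final 'for i in range(n)' loop
def pvFindLoop (l s pref suf : List Int) (n : Nat) : Nat → Nat → Int
  | _, 0 => -1
  | i, rem + 1 =>
      if l.getD i 0 = s.getD i 0 ∧ (i = 0 ∨ pref.getD (i-1) 0 ≤ s.getD i 0) ∧
          (i = n - 1 ∨ s.getD i 0 < suf.getD (i+1) 0) then
        (i : Int)
      else pvFindLoop l s pref suf n (i+1) rem

def find_ordered_number_in_list_alt (l : List Int) : Int :=
  let s := PySem.List.sorted l (fun x => x) false
  let n := l.length
  let pref := pvPrefLoop l [] 0
  let suf := (pvSufLoop l.reverse [] 0).reverse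
  pvFindLoop l s pref suf n 0 n

-- ===== PRECONDITION & SPEC =====
-- 'l[i] would sit at position i in sorted(l)', stated by counting: #smaller ≤ i < #smaller-or-equal
def pvFix (l : List Int) (i : Nat) : Bool :=
  decide (l.countP (fun x => decide (x < l.getD i 0)) ≤ i ∧
          i < l.countP (fun x => decide (x ≤ l.getD i 0)))

-- 'index i partitions l': everything before is ≤ l[i], everything after is > l[i]
def pvPart (l : List Int) (i : Nat) : Bool :=
  (List.range l.length).all fun k =>
    decide ((k < i → l.getD k 0 ≤ l.getD i 0) ∧ (i < k → l.getD i 0 < l.getD k 0))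

-- On lists where some index i sits at its sorted position but fails the partition test, while the
-- first truly partitioning index j lies after it, A returns -1 (its failure flag t is set once and
-- never reset), whereas B returns j — the intended answer.
def D_find_ordered_number_in_list (l : List Int) : Prop :=
  ∃ i ∈ List.range l.length, ∃ j ∈ List.range l.length, i < j ∧
    pvFix l i = true ∧ pvPart l j = true ∧ ∀ k ∈ List.range j, pvPart l k = false
instance (l : List Int) : Decidable (D_find_ordered_number_in_list l) := by
  unfold D_find_ordered_number_in_list; infer_instance

def Spec_find_ordered_number_in_list (l : List Int) (out : Int) : Prop :=
  ¬ D_find_ordered_number_in_list l → out = find_ordered_number_in_list_alt l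
instance (l : List Int) (out : Int) : Decidable (Spec_find_ordered_number_in_list l out) := by
  unfold Spec_find_ordered_number_in_list; infer_instance

def pvDiffWitness_find_ordered_number_in_list : List Int := [2, 2, 1, 4]
def pvDiffWitnessOut_find_ordered_number_in_list : Int × Int := (-1, 3)

-- ===== CLAIM =====
def Claim_unchanged_find_ordered_number_in_list : Prop := ∀ (l : List Int), Dom_find_ordered_number_in_list l → Spec_find_ordered_number_in_list l (find_ordered_number_in_list l)
def Claim_changed_find_ordered_number_in_list : Prop := Dom_find_ordered_number_in_list (pvDiffWitness_find_ordered_number_in_list) ∧ D_find_ordered_number_in_list (pvDiffWitness_find_ordered_number_in_list) ∧ find_ordered_number_in_list (pvDiffWitness_find_ordered_number_in_list) = pvDiffWitnessOut_find_ordered_number_in_list.1 ∧ find_ordered_number_in_list_alt (pvDiffWitness_find_ordered_number_in_list) = pvDiffWitnessOut_find_ordered_number_in_list.2 ∧ pvDiffWitnessOut_find_ordered_number_in_list.1 ≠ pvDiffWitnessOut_find_ordered_number_in_list.2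
def Claim_exact_find_ordered_number_in_list : Prop := ∀ (l : List Int), Dom_find_ordered_number_in_list l → D_find_ordered_number_in_list l → find_ordered_number_in_list l ≠ find_ordered_number_in_list_alt l

-- ===== LEMMAS AND PROOFS =====

-- the sorted copy both ports build, and the valid-index predicate relative to it
def pvS (l : List Int) : List Int := PySem.List.sorted l (fun x => x) false

def pvOk (l s : List Int) (i : Nat) : Bool :=
  (l.getD i 0 == s.getD i 0) &&
  ((List.range l.length).all fun j =>
    decide ((j < i → l.getD j 0 ≤ s.getD i 0) ∧ (i < j → s.getD i 0 < l.getD j 0)))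

theorem getD_idx (xs : List Int) (k : Nat) (h : k < xs.length) : xs.getD k 0 = xs[k] := by
  rw [List.getD_eq_getElem?_getD, List.getElem?_eq_getElem h]; rfl

theorem count_lt_le (xs : List Int) (v : Int) (i : Nat)
    (hv : ∀ k, i ≤ k → k < xs.length → v ≤ xs.getD k 0) :
    List.countP (fun x => decide (x < v)) xs ≤ i := by
  have hsplit : List.countP (fun x => decide (x < v)) xs
      = List.countP (fun x => decide (x < v)) (xs.take i)
        + List.countP (fun x => decide (x < v)) (xs.drop i) := by
    rw [← List.countP_append, List.take_append_drop]
  have hdrop : List.countP (fun x => decide (x < v)) (xs.drop i) = 0 := by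
    rw [List.countP_eq_zero]
    intro a ha
    obtain ⟨k, hk, rfl⟩ := List.mem_iff_getElem.1 ha
    rw [List.getElem_drop]
    have hlen : i + k < xs.length := by
      have := hk; simp [List.length_drop] at this; omega
    have := hv (i + k) (by omega) hlen
    rw [getD_idx xs (i + k) hlen] at this
    simpa using not_lt_of_ge this
  have htake : List.countP (fun x => decide (x < v)) (xs.take i) ≤ i := by
    calc List.countP (fun x => decide (x < v)) (xs.take i) ≤ (xs.take i).length :=
          List.countP_le_length
      _ ≤ i := by simp [List.length_take]
  omega

theorem lt_count_le (xs : List Int) (v : Int) (i : Nat) (h : i < xs.length)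
    (hv : ∀ k, k ≤ i → xs.getD k 0 ≤ v) :
    i < List.countP (fun x => decide (x ≤ v)) xs := by
  have hsplit : List.countP (fun x => decide (x ≤ v)) xs
      = List.countP (fun x => decide (x ≤ v)) (xs.take (i+1))
        + List.countP (fun x => decide (x ≤ v)) (xs.drop (i+1)) := by
    rw [← List.countP_append, List.take_append_drop]
  have htake : List.countP (fun x => decide (x ≤ v)) (xs.take (i+1))
      = (xs.take (i+1)).length := by
    rw [List.countP_eq_length]
    intro a ha
    obtain ⟨k, hk, rfl⟩ := List.mem_iff_getElem.1 ha
    rw [List.getElem_take]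
    have hki : k ≤ i := by simp [List.length_take] at hk; omega
    have hkl : k < xs.length := by simp [List.length_take] at hk; omega
    have := hv k hki
    rw [getD_idx xs k hkl] at this
    simpa using this
  have hlen : (xs.take (i+1)).length = i + 1 := by simp [List.length_take]; omega
  omega

theorem length_pvS (l : List Int) : (pvS l).length = l.length := by
  simpa [pvS] using (PySem.List.sorted_perm l (fun x => x) false).length_eq

theorem pvS_mono (l : List Int) (p q : Nat) (hpq : p ≤ q) (hq : q < (pvS l).length) :
    (pvS l).getD p 0 ≤ (pvS l).getD q 0 := by
  rw [getD_idx _ p (by omega), getD_idx _ q hq]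
  exact PySem.List.sorted_id_getElem_mono l hpq hq

-- position i of the sorted copy holds v exactly when #{x < v} ≤ i < #{x ≤ v}
theorem sorted_getD_count_iff (l : List Int) (i : Nat) (h : i < l.length) (v : Int) :
    ((pvS l).getD i 0 = v ↔
      List.countP (fun x => decide (x < v)) l ≤ i ∧
        i < List.countP (fun x => decide (x ≤ v)) l) := by
  have hperm : (pvS l).Perm l := PySem.List.sorted_perm l (fun x => x) false
  rw [← List.Perm.countP_eq _ hperm, ← List.Perm.countP_eq _ hperm]
  have hsl : i < (pvS l).length := by rw [length_pvS]; omega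
  have hpart1 : List.countP (fun x => decide (x < (pvS l).getD i 0)) (pvS l) ≤ i :=
    count_lt_le (pvS l) _ i fun k hk1 hk2 => pvS_mono l i k hk1 hk2
  have hpart2 : i < List.countP (fun x => decide (x ≤ (pvS l).getD i 0)) (pvS l) :=
    lt_count_le (pvS l) _ i hsl fun k hk => pvS_mono l k i hk hsl
  constructor
  · rintro rfl
    exact ⟨hpart1, hpart2⟩
  · rintro ⟨h1, h2⟩
    rcases lt_trichotomy ((pvS l).getD i 0) v with hc | hc | hc
    · exfalso
      have : List.countP (fun x => decide (x ≤ (pvS l).getD i 0)) (pvS l)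
          ≤ List.countP (fun x => decide (x < v)) (pvS l) :=
        List.countP_mono_left fun x _ hx => by
          simp only [decide_eq_true_eq] at hx ⊢; omega
      omega
    · exact hc
    · exfalso
      have : List.countP (fun x => decide (x ≤ v)) (pvS l)
          ≤ List.countP (fun x => decide (x < (pvS l).getD i 0)) (pvS l) :=
        List.countP_mono_left fun x _ hx => by
          simp only [decide_eq_true_eq] at hx ⊢; omega
      omega

theorem pvFix_iff (l : List Int) (i : Nat) (h : i < l.length) :
    (pvFix l i = true ↔ l.getD i 0 = (pvS l).getD i 0) := by
  rw [show (l.getD i 0 = (pvS l).getD i 0) ↔ ((pvS l).getD i 0 = l.getD i 0) from eq_comm,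
    sorted_getD_count_iff l i h (l.getD i 0)]
  simp [pvFix]


-- pvOk spelled out
theorem pvOk_iff (l s : List Int) (i : Nat) :
    pvOk l s i = true ↔ l.getD i 0 = s.getD i 0 ∧
      ∀ j, j < l.length → (j < i → l.getD j 0 ≤ s.getD i 0) ∧ (i < j → s.getD i 0 < l.getD j 0) := by
  simp only [pvOk, Bool.and_eq_true, beq_iff_eq, List.all_eq_true, List.mem_range,
    decide_eq_true_eq]

theorem pvOk_fixed {l s : List Int} {i : Nat} (h : pvOk l s i = true) :
    l.getD i 0 = s.getD i 0 := ((pvOk_iff l s i).1 h).1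

theorem pvPart_iff (l : List Int) (j : Nat) (h : j < l.length) :
    (pvPart l j = true ↔ pvOk l (pvS l) j = true) := by
  rw [pvOk_iff]
  simp only [pvPart, List.all_eq_true, List.mem_range, decide_eq_true_eq]
  constructor
  · intro hp
    have hfix : l.getD j 0 = (pvS l).getD j 0 := by
      rw [eq_comm, sorted_getD_count_iff l j h (l.getD j 0)]
      refine ⟨count_lt_le l _ j fun k hk1 hk2 => ?_, lt_count_le l _ j h fun k hk => ?_⟩
      · rcases Nat.eq_or_lt_of_le hk1 with rfl | hlt
        · exact le_rfl
        · exact le_of_lt ((hp k hk2).2 hlt)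
      · rcases Nat.eq_or_lt_of_le hk with rfl | hlt
        · exact le_rfl
        · exact (hp k (by omega)).1 hlt
    refine ⟨hfix, fun k hk => ?_⟩
    rw [← hfix]
    exact hp k hk
  · rintro ⟨hfix, hall⟩ k hk
    rw [hfix]
    exact hall k hk

-- ----- A-side loop characterisation -----
theorem pvInnerJ_one (ls : List Int) (x : Int) : ∀ rem j, pvInnerJ ls x j rem 1 = 1 := by
  intro rem; induction rem with
  | zero => intro j; rfl
  | succ r ih => intro j; simp only [pvInnerJ]; split <;> simp [ih]

theorem pvInnerK_one (ls : List Int) (x : Int) : ∀ rem k, pvInnerK ls x k rem 1 = 1 := by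
  intro rem; induction rem with
  | zero => intro k; rfl
  | succ r ih => intro k; simp only [pvInnerK]; split <;> simp [ih]

theorem pvInnerJ_zero_of (ls : List Int) (x : Int) :
    ∀ rem j, (∀ j', j ≤ j' → j' < j + rem → ls.getD j' 0 ≤ x) → pvInnerJ ls x j rem 0 = 0 := by
  intro rem; induction rem with
  | zero => intro j _; rfl
  | succ r ih =>
      intro j h
      have h0 : ls.getD j 0 ≤ x := h j le_rfl (by omega)
      simp only [pvInnerJ, if_pos h0]
      exact ih (j+1) fun j' h1 h2 => h j' (by omega) (by omega)

theorem pvInnerJ_zero_bad (ls : List Int) (x : Int) :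
    ∀ rem j j', j ≤ j' → j' < j + rem → x < ls.getD j' 0 → pvInnerJ ls x j rem 0 = 1 := by
  intro rem; induction rem with
  | zero => intro j j' h1 h2; omega
  | succ r ih =>
      intro j j' h1 h2 h3
      by_cases h0 : ls.getD j 0 ≤ x
      · have hne : j ≠ j' := by rintro rfl; omega
        simp only [pvInnerJ, if_pos h0]
        exact ih (j+1) j' (by omega) (by omega) h3
      · simp only [pvInnerJ]; rw [if_neg h0]

theorem pvInnerK_zero_of (ls : List Int) (x : Int) :
    ∀ rem k, (∀ k', k ≤ k' → k' < k + rem → x < ls.getD k' 0) → pvInnerK ls x k rem 0 = 0 := by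
  intro rem; induction rem with
  | zero => intro k _; rfl
  | succ r ih =>
      intro k h
      have h0 : x < ls.getD k 0 := h k le_rfl (by omega)
      simp only [pvInnerK, if_pos h0]
      exact ih (k+1) fun k' h1 h2 => h k' (by omega) (by omega)

theorem pvInnerK_zero_bad (ls : List Int) (x : Int) :
    ∀ rem k k', k ≤ k' → k' < k + rem → ls.getD k' 0 ≤ x → pvInnerK ls x k rem 0 = 1 := by
  intro rem; induction rem with
  | zero => intro k k' h1 h2; omega
  | succ r ih =>
      intro k k' h1 h2 h3
      by_cases h0 : x < ls.getD k 0
      · have hne : k ≠ k' := by rintro rfl; omega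
        simp only [pvInnerK, if_pos h0]
        exact ih (k+1) k' (by omega) (by omega) h3
      · simp only [pvInnerK]; rw [if_neg h0]

theorem pvGoA_one (ls lt : List Int) (n : Nat) : ∀ rem i, pvGoA ls lt n i rem 1 = -1 := by
  intro rem; induction rem with
  | zero => intro i; rfl
  | succ r ih =>
      intro i
      simp only [pvGoA]
      split
      · rw [pvInnerJ_one, pvInnerK_one]; simp [ih]
      · exact ih (i+1)

-- abstract search for A: at the first index at its sorted position, return it if valid else -1
def pvSearchA (l s : List Int) : Nat → Nat → Int
  | _, 0 => -1
  | i, rem + 1 =>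
      if l.getD i 0 = s.getD i 0 then (if pvOk l s i = true then (i : Int) else -1)
      else pvSearchA l s (i+1) rem

-- abstract search for B: first valid index
def pvSearchB (l s : List Int) : Nat → Nat → Int
  | _, 0 => -1
  | i, rem + 1 => if pvOk l s i = true then (i : Int) else pvSearchB l s (i+1) rem

theorem pvGoA_eq_searchA (l s : List Int) :
    ∀ rem i, i + rem = l.length → pvGoA l s l.length i rem 0 = pvSearchA l s i rem := by
  intro rem; induction rem with
  | zero => intro i _; rfl
  | succ r ih =>
      intro i hn
      by_cases hf : l.getD i 0 = s.getD i 0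
      · simp only [pvGoA, pvSearchA, if_pos hf]
        by_cases hok : pvOk l s i = true
        · have hall := ((pvOk_iff l s i).1 hok).2
          have h1 : pvInnerJ l (s.getD i 0) 0 i 0 = 0 :=
            pvInnerJ_zero_of l _ i 0 fun j' _ h2 => (hall j' (by omega)).1 (by omega)
          have h2 : pvInnerK l (s.getD i 0) (i+1) (l.length - (i+1)) 0 = 0 :=
            pvInnerK_zero_of l _ _ (i+1) fun k' hk1 hk2 => (hall k' (by omega)).2 (by omega)
          rw [h1, h2]
          simp [hok]
        · have hex : ∃ j, j < l.length ∧
              ¬((j < i → l.getD j 0 ≤ s.getD i 0) ∧ (i < j → s.getD i 0 < l.getD j 0)) := by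
            by_contra hc
            push_neg at hc
            exact hok ((pvOk_iff l s i).2 ⟨hf, fun j hj => hc j hj⟩)
          obtain ⟨j, hj, hviol⟩ := hex
          have hcase : (j < i ∧ s.getD i 0 < l.getD j 0) ∨ (i < j ∧ l.getD j 0 ≤ s.getD i 0) := by
            by_cases hji : j < i
            · refine Or.inl ⟨hji, ?_⟩
              by_contra hle
              exact hviol ⟨fun _ => le_of_not_gt hle, fun h => absurd h (by omega)⟩
            · have hij : i < j := by
                rcases Nat.eq_or_lt_of_le (Nat.le_of_not_lt hji) with h | h
                · exfalso
                  exact hviol ⟨fun hh => absurd hh (by omega), fun hh => absurd hh (by omega)⟩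
                · exact h
              refine Or.inr ⟨hij, ?_⟩
              by_contra hgt
              exact hviol ⟨fun hh => absurd hh (by omega), fun _ => lt_of_not_ge hgt⟩
          have ht2 : pvInnerK l (s.getD i 0) (i+1) (l.length - (i+1))
              (pvInnerJ l (s.getD i 0) 0 i 0) = 1 := by
            rcases hcase with ⟨hji, hbad⟩ | ⟨hij, hle⟩
            · rw [pvInnerJ_zero_bad l _ i 0 j (by omega) (by omega) hbad]
              exact pvInnerK_one l _ _ _
            · by_cases hJ : ∀ j', j' < i → l.getD j' 0 ≤ s.getD i 0
              · rw [pvInnerJ_zero_of l _ i 0 fun j' _ h2 => hJ j' (by omega)]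
                exact pvInnerK_zero_bad l _ _ (i+1) j (by omega) (by omega) hle
              · push_neg at hJ
                obtain ⟨j', hj'i, hj'bad⟩ := hJ
                rw [pvInnerJ_zero_bad l _ i 0 j' (by omega) (by omega) hj'bad]
                exact pvInnerK_one l _ _ _
          rw [ht2]
          simp only [if_neg (by norm_num : ¬ (1 : Int) = 0), if_neg hok]
          exact pvGoA_one l s l.length r (i+1)
      · simp only [pvGoA, pvSearchA, if_neg hf]
        exact ih (i+1) (by omega)

-- ----- B-side: prefix-max / suffix-min characterisation -----
-- pure forms of the two accumulation loops
def pvG (xs : List Int) (m : Int) : List Int :=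
  match xs with
  | [] => []
  | x :: r => max m x :: pvG r (max m x)

def pvH (xs : List Int) (m : Int) : List Int :=
  match xs with
  | [] => []
  | x :: r => min m x :: pvH r (min m x)

theorem pvPrefLoop_acc : ∀ (xs acc : List Int) (m : Int), acc ≠ [] →
    pvPrefLoop xs acc m = acc ++ pvG xs m := by
  intro xs; induction xs with
  | nil => intro acc m _; simp [pvPrefLoop, pvG]
  | cons x r ih =>
      intro acc m hacc
      have he : acc.isEmpty = false := by simpa [List.isEmpty_iff] using hacc
      simp only [pvPrefLoop, pvG, he, Bool.false_eq_true, if_false]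
      rw [ih (acc ++ [max m x]) (max m x) (by simp)]
      simp

theorem pvSufLoop_acc : ∀ (xs acc : List Int) (m : Int), acc ≠ [] →
    pvSufLoop xs acc m = acc ++ pvH xs m := by
  intro xs; induction xs with
  | nil => intro acc m _; simp [pvSufLoop, pvH]
  | cons x r ih =>
      intro acc m hacc
      have he : acc.isEmpty = false := by simpa [List.isEmpty_iff] using hacc
      simp only [pvSufLoop, pvH, he, Bool.false_eq_true, if_false]
      rw [ih (acc ++ [min m x]) (min m x) (by simp)]
      simp

theorem pvPrefLoop_nil_cons (x : Int) (r : List Int) :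
    pvPrefLoop (x :: r) [] 0 = x :: pvG r x := by
  simp only [pvPrefLoop, List.isEmpty_nil, if_true]
  simpa using pvPrefLoop_acc r [x] x (by simp)

theorem pvSufLoop_nil_cons (x : Int) (r : List Int) :
    pvSufLoop (x :: r) [] 0 = x :: pvH r x := by
  simp only [pvSufLoop, List.isEmpty_nil, if_true]
  simpa using pvSufLoop_acc r [x] x (by simp)

theorem pvH_length : ∀ (xs : List Int) (m : Int), (pvH xs m).length = xs.length := by
  intro xs; induction xs with
  | nil => intro m; rfl
  | cons x r ih => intro m; simp [pvH, ih]

theorem pvG_le : ∀ (xs : List Int) (m : Int) (i : Nat) (v : Int), i < xs.length →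
    ((pvG xs m).getD i 0 ≤ v ↔ m ≤ v ∧ ∀ j, j ≤ i → xs.getD j 0 ≤ v) := by
  intro xs; induction xs with
  | nil => intro m i v h; simp at h
  | cons x r ih =>
      intro m i v h
      cases i with
      | zero =>
          simp only [pvG, List.getD_cons_zero, max_le_iff]
          constructor
          · rintro ⟨h1, h2⟩
            exact ⟨h1, fun j hj => by interval_cases j; simpa⟩
          · rintro ⟨h1, h2⟩
            exact ⟨h1, by simpa using h2 0 le_rfl⟩
      | succ i =>
          simp only [pvG, List.getD_cons_succ]
          rw [ih (max m x) i v (by simpa using h)]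
          constructor
          · rintro ⟨h1, h2⟩
            refine ⟨le_trans (le_max_left _ _) h1, fun j hj => ?_⟩
            cases j with
            | zero => simpa using le_trans (le_max_right _ _) h1
            | succ j => simpa using h2 j (by omega)
          · rintro ⟨h1, h2⟩
            refine ⟨max_le h1 (by simpa using h2 0 (by omega)), fun j hj => ?_⟩
            simpa using h2 (j+1) (by omega)

theorem pvH_lt : ∀ (xs : List Int) (m : Int) (i : Nat) (v : Int), i < xs.length →
    (v < (pvH xs m).getD i 0 ↔ v < m ∧ ∀ j, j ≤ i → v < xs.getD j 0) := by
  intro xs; induction xs with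
  | nil => intro m i v h; simp at h
  | cons x r ih =>
      intro m i v h
      cases i with
      | zero =>
          simp only [pvH, List.getD_cons_zero, lt_min_iff]
          constructor
          · rintro ⟨h1, h2⟩
            exact ⟨h1, fun j hj => by interval_cases j; simpa⟩
          · rintro ⟨h1, h2⟩
            exact ⟨h1, by simpa using h2 0 le_rfl⟩
      | succ i =>
          simp only [pvH, List.getD_cons_succ]
          rw [ih (min m x) i v (by simpa using h)]
          constructor
          · rintro ⟨h1, h2⟩
            refine ⟨lt_of_lt_of_le h1 (min_le_left _ _), fun j hj => ?_⟩
            cases j with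
            | zero => simpa using lt_of_lt_of_le h1 (min_le_right _ _)
            | succ j => simpa using h2 j (by omega)
          · rintro ⟨h1, h2⟩
            refine ⟨lt_min h1 (by simpa using h2 0 (by omega)), fun j hj => ?_⟩
            simpa using h2 (j+1) (by omega)

-- pref[i] bounds exactly the prefix l[0..i]
theorem pref_iff (l : List Int) (i : Nat) (v : Int) (h : i < l.length) :
    ((pvPrefLoop l [] 0).getD i 0 ≤ v ↔ ∀ j, j ≤ i → l.getD j 0 ≤ v) := by
  cases l with
  | nil => simp at h
  | cons x r =>
      rw [pvPrefLoop_nil_cons]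
      cases i with
      | zero =>
          simp only [List.getD_cons_zero]
          constructor
          · intro h1 j hj; interval_cases j; simpa
          · intro h1; simpa using h1 0 le_rfl
      | succ i =>
          simp only [List.getD_cons_succ]
          rw [pvG_le r x i v (by simpa using h)]
          constructor
          · rintro ⟨h1, h2⟩ j hj
            cases j with
            | zero => simpa
            | succ j => simpa using h2 j (by omega)
          · intro h1
            exact ⟨by simpa using h1 0 (by omega), fun j hj => by simpa using h1 (j+1) (by omega)⟩

theorem getD_reverse (xs : List Int) (t : Nat) (h : t < xs.length) :
    xs.reverse.getD t 0 = xs.getD (xs.length - 1 - t) 0 := by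
  rw [List.getD_eq_getElem?_getD, List.getD_eq_getElem?_getD]
  rw [List.getElem?_eq_getElem (by simpa using h), List.getElem?_eq_getElem (by omega)]
  simp [List.getElem_reverse]

-- suf[t] bounds exactly the suffix l[t..]
theorem suf_iff (l : List Int) (t : Nat) (v : Int) (h : t < l.length) :
    (v < ((pvSufLoop l.reverse [] 0).reverse).getD t 0 ↔
      ∀ k, t ≤ k → k < l.length → v < l.getD k 0) := by
  have hne : l.reverse ≠ [] := by
    intro hc
    have : l = [] := by simpa using congrArg List.reverse hc
    subst this; simp at h
  obtain ⟨y, r', hr⟩ := List.exists_cons_of_ne_nil hne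
  have hn : l.length = r'.length + 1 := by
    have := congrArg List.length hr; simpa using this
  rw [hr, pvSufLoop_nil_cons]
  have hlen : (y :: pvH r' y).length = l.length := by simp [pvH_length, hn]
  rw [getD_reverse _ t (by omega)]
  have hy : y = l.getD (l.length - 1) 0 := by
    have h1 : l.reverse.getD 0 0 = y := by rw [hr]; rfl
    rw [getD_reverse l 0 (by omega)] at h1
    simpa using h1.symm
  have hr'get : ∀ j, j < r'.length → r'.getD j 0 = l.getD (l.length - 2 - j) 0 := by
    intro j hj
    have h1 : l.reverse.getD (j+1) 0 = r'.getD j 0 := by rw [hr]; simp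
    rw [getD_reverse l (j+1) (by omega)] at h1
    rw [← h1]
    congr 1
    omega
  rw [hlen]
  rcases Nat.lt_or_ge t (l.length - 1) with hc | hc
  · -- t < n-1 : index into pvH
    have hu : l.length - 1 - t = (l.length - 2 - t) + 1 := by omega
    rw [hu]
    simp only [List.getD_cons_succ]
    rw [pvH_lt r' y (l.length - 2 - t) v (by omega)]
    constructor
    · rintro ⟨h1, h2⟩ k hk1 hk2
      rcases Nat.lt_or_ge k (l.length - 1) with hk | hk
      · have := h2 (l.length - 2 - k) (by omega)
        rw [hr'get _ (by omega)] at this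
        have he : l.length - 2 - (l.length - 2 - k) = k := by omega
        rwa [he] at this
      · have hk' : k = l.length - 1 := by omega
        rw [hk', ← hy]; exact h1
    · intro hall
      refine ⟨by rw [hy]; exact hall _ (by omega) (by omega), fun j hj => ?_⟩
      rw [hr'get _ (by omega)]
      exact hall _ (by omega) (by omega)
  · -- t = n-1 : the head y
    have ht' : t = l.length - 1 := by omega
    have : l.length - 1 - t = 0 := by omega
    rw [this]
    simp only [List.getD_cons_zero]
    constructor
    · intro h1 k hk1 hk2
      have : k = l.length - 1 := by omega
      rw [this, ← hy]; exact h1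
    · intro hall
      rw [hy]; exact hall _ (by omega) (by omega)

-- B's scan condition at i is exactly pvOk
theorem cond_iff (l s : List Int) (i : Nat) (h : i < l.length) :
    ((l.getD i 0 = s.getD i 0 ∧
      (i = 0 ∨ (pvPrefLoop l [] 0).getD (i-1) 0 ≤ s.getD i 0) ∧
      (i = l.length - 1 ∨ s.getD i 0 < ((pvSufLoop l.reverse [] 0).reverse).getD (i+1) 0))
      ↔ pvOk l s i = true) := by
  rw [pvOk_iff]
  constructor
  · rintro ⟨h1, h2, h3⟩
    refine ⟨h1, fun j hj => ⟨fun hji => ?_, fun hij => ?_⟩⟩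
    · rcases h2 with h2 | h2
      · omega
      · exact (pref_iff l (i-1) _ (by omega)).1 h2 j (by omega)
    · rcases h3 with h3 | h3
      · omega
      · exact (suf_iff l (i+1) _ (by omega)).1 h3 j (by omega) hj
  · rintro ⟨h1, hall⟩
    refine ⟨h1, ?_, ?_⟩
    · rcases Nat.eq_zero_or_pos i with h0 | h0
      · exact Or.inl h0
      · exact Or.inr ((pref_iff l (i-1) _ (by omega)).2
          fun j hj => (hall j (by omega)).1 (by omega))
    · rcases Nat.lt_or_ge i (l.length - 1) with hc | hc
      · exact Or.inr ((suf_iff l (i+1) _ (by omega)).2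
          fun k hk1 hk2 => (hall k hk2).2 (by omega))
      · exact Or.inl (by omega)

theorem pvFindLoop_eq_searchB (l s : List Int) :
    ∀ rem i, i + rem = l.length →
      pvFindLoop l s (pvPrefLoop l [] 0) ((pvSufLoop l.reverse [] 0).reverse) l.length i rem
        = pvSearchB l s i rem := by
  intro rem; induction rem with
  | zero => intro i _; rfl
  | succ r ih =>
      intro i hn
      simp only [pvFindLoop, pvSearchB]
      by_cases hok : pvOk l s i = true
      · rw [if_pos ((cond_iff l s i (by omega)).2 hok), if_pos hok]
      · rw [if_neg (fun hc => hok ((cond_iff l s i (by omega)).1 hc)), if_neg hok]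
        exact ih (i+1) (by omega)

-- ----- assembling the equivalence -----
theorem pvSearchB_none (l s : List Int) :
    ∀ rem i, (∀ j, i ≤ j → j < i + rem → pvOk l s j = false) → pvSearchB l s i rem = -1 := by
  intro rem; induction rem with
  | zero => intro i _; rfl
  | succ r ih =>
      intro i h
      have h0 : pvOk l s i = false := h i le_rfl (by omega)
      simp only [pvSearchB, h0, Bool.false_eq_true, if_false]
      exact ih (i+1) fun j h1 h2 => h j (by omega) (by omega)

theorem pvSearchB_nonneg (l s : List Int) :
    ∀ rem i, (∃ j, i ≤ j ∧ j < i + rem ∧ pvOk l s j = true) → 0 ≤ pvSearchB l s i rem := by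
  intro rem; induction rem with
  | zero => rintro i ⟨j, h1, h2, _⟩; omega
  | succ r ih =>
      rintro i ⟨j, h1, h2, h3⟩
      by_cases h0 : pvOk l s i = true
      · simp [pvSearchB, h0]
      · simp only [pvSearchB, h0, Bool.false_eq_true, if_false]
        exact ih (i+1) ⟨j, by

          rcases Nat.eq_or_lt_of_le h1 with rfl | h
          · exact absurd h3 (by simp [h0])
          · exact ⟨by omega, by omega, h3⟩⟩

theorem pvSearchA_neg (l s : List Int) :
    ∀ rem i k0, i ≤ k0 → k0 < i + rem → l.getD k0 0 = s.getD k0 0 → pvOk l s k0 = false →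
      (∀ k, i ≤ k → k < k0 → l.getD k 0 ≠ s.getD k 0) → pvSearchA l s i rem = -1 := by
  intro rem; induction rem with
  | zero => intro i k0 h1 h2; omega
  | succ r ih =>
      intro i k0 h1 h2 hfix hok hmin
      by_cases hf : l.getD i 0 = s.getD i 0
      · have : k0 = i := by
          by_contra hc
          exact hmin i le_rfl (by omega) hf
        subst this
        simp only [pvSearchA]
        rw [if_pos hf, if_neg (by simp [hok])]
      · simp only [pvSearchA, if_neg hf]
        have : k0 ≠ i := fun hc => hf (hc ▸ hfix)
        exact ih (i+1) k0 (by omega) (by omega) hfix hok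
          fun k hk1 hk2 => hmin k (by omega) hk2
-- main: outside D_, the two abstract searches coincide
theorem searchA_eq_searchB (l : List Int) (hnD : ¬ D_find_ordered_number_in_list l) :
    ∀ rem i, i + rem = l.length →
      (∀ k, k < i → l.getD k 0 ≠ (pvS l).getD k 0) →
      pvSearchA l (pvS l) i rem = pvSearchB l (pvS l) i rem := by
  intro rem; induction rem with
  | zero => intro i _ _; rfl
  | succ r ih =>
      intro i hn hinv
      by_cases hf : l.getD i 0 = (pvS l).getD i 0
      · by_cases hok : pvOk l (pvS l) i = true
        · simp only [pvSearchA, pvSearchB]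
          rw [if_pos hf, if_pos hok, if_pos hok]
        · have hnone : ∀ j, i ≤ j → j < l.length → pvOk l (pvS l) j = false := by
            by_contra hc
            push_neg at hc
            obtain ⟨j, hj1, hj2, hj3⟩ := hc
            have hj3 : pvOk l (pvS l) j = true := by
              revert hj3; cases pvOk l (pvS l) j <;> simp
            have hP : ∃ k, pvOk l (pvS l) k = true := ⟨j, hj3⟩
            set j0 := Nat.find hP with hj0def
            have hj0 : pvOk l (pvS l) j0 = true := Nat.find_spec hP
            have hj0min : ∀ k, k < j0 → pvOk l (pvS l) k = false := fun k hk => by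
              have := Nat.find_min hP hk
              simpa using this
            have hj0le : j0 ≤ j := Nat.find_min' hP hj3
            have hij0 : i < j0 := by
              rcases Nat.lt_trichotomy j0 i with h | h | h
              · exact absurd (pvOk_fixed hj0) (hinv j0 h)
              · subst h; exact absurd hj0 (by simp [hok])
              · exact h
            have hj0n : j0 < l.length := by omega
            exact hnD ⟨i, by simp only [List.mem_range]; omega, j0,
              by simp only [List.mem_range]; omega, hij0,
              (pvFix_iff l i (by omega)).2 hf,
              (pvPart_iff l j0 hj0n).2 hj0,
              fun k hk => by
                have hk' : k < j0 := by simpa [List.mem_range] using hk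
                have hOkF := hj0min k hk'
                cases hPk : pvPart l k with
                | false => rfl
                | true => exact absurd ((pvPart_iff l k (by omega)).1 hPk) (by simp [hOkF])⟩
          have hA : pvSearchA l (pvS l) i (r+1) = -1 := by
            simp only [pvSearchA]
            rw [if_pos hf, if_neg hok]
          have hB : pvSearchB l (pvS l) i (r+1) = -1 :=
            pvSearchB_none l (pvS l) (r+1) i fun j h1 h2 => hnone j h1 (by omega)
          rw [hA, hB]
      · have hok : pvOk l (pvS l) i ≠ true := fun hc => hf (pvOk_fixed hc)
        simp only [pvSearchA, pvSearchB, if_neg hf, if_neg hok]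
        exact ih (i+1) (by omega)
          fun k hk => by
            rcases Nat.lt_or_ge k i with h | h
            · exact hinv k h
            · have : k = i := by omega
              subst this; exact hf

theorem portA_eq_searchA (l : List Int) :
    find_ordered_number_in_list l = pvSearchA l (pvS l) 0 l.length := by
  show pvGoA l (pvS l) (pvS l).length 0 (pvS l).length 0 = _
  rw [length_pvS]
  exact pvGoA_eq_searchA l (pvS l) l.length 0 (by omega)

theorem portB_eq_searchB (l : List Int) :
    find_ordered_number_in_list_alt l = pvSearchB l (pvS l) 0 l.length := by
  show pvFindLoop l (pvS l) _ _ l.length 0 l.length = _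
  exact pvFindLoop_eq_searchB l (pvS l) l.length 0 (by omega)

-- ===== VERDICT =====
theorem find_ordered_number_in_list_spec : Claim_unchanged_find_ordered_number_in_list := by
  intro l _ hnD
  rw [portA_eq_searchA, portB_eq_searchB]
  exact searchA_eq_searchB l hnD l.length 0 (by omega) (by omega)
theorem find_ordered_number_in_list_changed : Claim_changed_find_ordered_number_in_list := by
  unfold Claim_changed_find_ordered_number_in_list; decide
theorem find_ordered_number_in_list_tight : Claim_exact_find_ordered_number_in_list := by
  intro l _ hD
  obtain ⟨i, hi, j, hj, hij, hfixb, hokb, hmin⟩ := hD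
  simp only [List.mem_range] at hi hj
  have hfix : l.getD i 0 = (pvS l).getD i 0 := (pvFix_iff l i hi).1 hfixb
  have hokj : pvOk l (pvS l) j = true := (pvPart_iff l j hj).1 hokb
  have hminr : ∀ k, k < j → pvOk l (pvS l) k = false := fun k hk => by
    have hPk := hmin k (by simpa [List.mem_range] using hk)
    cases hOk : pvOk l (pvS l) k with
    | false => rfl
    | true => exact absurd ((pvPart_iff l k (by omega)).2 hOk) (by simp [hPk])
  have hP : ∃ k, l.getD k 0 = (pvS l).getD k 0 := ⟨i, hfix⟩
  set k0 := Nat.find hP with hk0def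
  have hk0 : l.getD k0 0 = (pvS l).getD k0 0 := Nat.find_spec hP
  have hk0le : k0 ≤ i := Nat.find_min' hP hfix
  have hk0min : ∀ k, k < k0 → l.getD k 0 ≠ (pvS l).getD k 0 := fun k hk => by
    have := Nat.find_min hP hk; simpa using this
  have hA : find_ordered_number_in_list l = -1 := by
    rw [portA_eq_searchA]
    exact pvSearchA_neg l (pvS l) l.length 0 k0 (by omega) (by omega) hk0
      (hminr k0 (by omega)) (fun k _ hk => hk0min k hk)
  have hB : 0 ≤ find_ordered_number_in_list_alt l := by
    rw [portB_eq_searchB]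
    exact pvSearchB_nonneg l (pvS l) l.length 0 ⟨j, by omega, by omega, hokj⟩
  rw [hA]
  intro hc
  rw [← hc] at hB
  omega
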